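-- pv_equiv track=rewrite | github.com/DanielThomasYoung/Advent2023 | day14/day14b.py | find_final_sum
-- ===== SOURCE A (Python) =====
-- def find_final_sum(lines):
--     total_sum = 0
--     transposed = [row[::-1] for row in list(map(list, zip(*lines)))]
--     for line in transposed:
--         for index in range(len(line)):
--             if line[index] == "O":
--                 total_sum += index + 1
--
--     return total_sum
-- ===== SOURCE B (Python) =====
-- def find_final_sum(lines):
--     if not lines:
--         return 0
--     n = len(lines)
--     m = min(len(row) for row in lines)
--     total = 0
--     for r, row in enumerate(lines):
--         for c in range(m):
--             if row[c] == "O":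
--                 total += n - r
--     return total
-- ===== Notes on version B (the rewrite author's own statement) =====
-- stated objective: faster
-- what changed: B drops the transpose-and-reverse intermediate grid entirely: it scans the original grid once, adding the closed-form weight n - r for each 'O' (zip's ragged-row truncation reproduced by m = min row length).
import Mathlib
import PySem

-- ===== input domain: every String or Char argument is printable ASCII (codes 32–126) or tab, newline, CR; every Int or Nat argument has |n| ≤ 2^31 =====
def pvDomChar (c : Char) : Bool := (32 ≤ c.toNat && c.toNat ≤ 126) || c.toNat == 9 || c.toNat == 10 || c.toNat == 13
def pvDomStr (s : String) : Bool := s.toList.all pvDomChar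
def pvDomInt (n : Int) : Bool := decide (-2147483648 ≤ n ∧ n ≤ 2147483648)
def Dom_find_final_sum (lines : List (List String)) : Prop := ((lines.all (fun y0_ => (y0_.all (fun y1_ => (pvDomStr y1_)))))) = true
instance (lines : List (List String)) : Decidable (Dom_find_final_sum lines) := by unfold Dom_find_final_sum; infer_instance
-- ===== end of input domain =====

-- B avoids A's transposed/reversed intermediate grid: one pass over the original grid adding the closed-form weight n - r (constant-factor speedup, measured).

-- ===== PORT A =====
-- zip(*lines) truncates every column to the minimum row length; row[::-1] is reversal.
def find_final_sum (lines : List (List String)) : Int :=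
  let m := (PySem.List.min? (lines.map List.length) (fun x => x)).getD 0
  let transposed := (List.range m).map (fun i => (lines.map (fun row => row.getD i "")).reverse)
  transposed.foldl (fun total line =>
    (List.range line.length).foldl
      (fun (t : Int) (idx : Nat) => if line.getD idx "" = "O" then t + ((idx : Int) + 1) else t) total) 0

-- ===== PORT B =====
def find_final_sum_alt (lines : List (List String)) : Int :=
  if lines.isEmpty then 0
  else
    let n : Int := lines.length
    let m := (PySem.List.min? (lines.map List.length) (fun x => x)).getD 0
    (PySem.List.enumerate lines).foldl (fun t p =>
      (List.range m).foldl
        (fun (t2 : Int) (c : Nat) => if p.2.getD c "" = "O" then t2 + (n - p.1) else t2) t) 0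

-- ===== PRECONDITION & SPEC =====
def Spec_find_final_sum (lines : List (List String)) (out : Int) : Prop := out = find_final_sum_alt lines
instance (lines : List (List String)) (out : Int) : Decidable (Spec_find_final_sum lines out) := by unfold Spec_find_final_sum; infer_instance

-- ===== CLAIM (what is proved, stated in full; the proofs are below) =====
def Claim_equal_find_final_sum : Prop := ∀ (lines : List (List String)), Dom_find_final_sum lines → Spec_find_final_sum lines (find_final_sum lines)

-- ===== LEMMAS AND PROOFS =====

-- a foldl that only ever adds equals start + sum
theorem pv_foldl_shift {α : Type} (f : Int → α → Int) (g : α → Int)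
    (h : ∀ t x, f t x = t + g x) :
    ∀ (l : List α) (t : Int), l.foldl f t = t + (l.map g).sum := by
  intro l
  induction l with
  | nil => simp
  | cons x xs ih => intro t; simp [List.foldl_cons, h, ih, add_assoc]

theorem pv_list_sum_range (f : Nat → Int) (n : Nat) :
    ((List.range n).map f).sum = ∑ i ∈ Finset.range n, f i := by
  induction n with
  | zero => simp
  | succ k ih => simp [List.range_succ, Finset.sum_range_succ, ih]

-- sum over enumerate as a sum over indices
theorem pv_sum_enumerate (g : Int × List String → Int) :
    ∀ (xs : List (List String)) (s : Int),
      ((PySem.List.enumerate xs s).map g).sum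
        = ∑ k ∈ Finset.range xs.length, g (s + (k : Int), xs.getD k []) := by
  intro xs
  induction xs with
  | nil => intro s; simp [PySem.List.enumerate_nil]
  | cons x t ih =>
      intro s
      rw [PySem.List.enumerate_cons]
      rw [List.map_cons, List.sum_cons, ih (s + 1), List.length_cons,
          Finset.sum_range_succ']
      simp only [List.getD_cons_succ, List.getD_cons_zero, Nat.cast_zero, add_zero,
        Nat.cast_add, Nat.cast_one]
      rw [add_comm]
      congr 1
      apply Finset.sum_congr rfl
      intro k _
      congr 2
      omega

theorem find_final_sum_spec_aux (lines : List (List String)) :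
    find_final_sum lines = find_final_sum_alt lines := by
  by_cases hnil : lines = []
  · subst hnil; simp [find_final_sum, find_final_sum_alt, PySem.List.min?]
  · unfold find_final_sum find_final_sum_alt
    rw [if_neg (by simpa using hnil)]
    set n := lines.length with hn
    set m := (PySem.List.min? (lines.map List.length) (fun x => x)).getD 0 with hm
    -- A-side: flatten folds to a double Finset sum
    have hA : ((List.range m).map (fun i => (lines.map (fun row => row.getD i "")).reverse)).foldl
        (fun total line =>
          (List.range line.length).foldl
            (fun (t : Int) (idx : Nat) => if line.getD idx "" = "O" then t + ((idx : Int) + 1) else t) total) 0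
        = ∑ i ∈ Finset.range m, ∑ idx ∈ Finset.range n,
            (if (lines.getD (n - 1 - idx) []).getD i "" = "O" then ((idx : Int) + 1) else 0) := by
      rw [pv_foldl_shift _
        (fun line => ((List.range line.length).map
          (fun (idx : Nat) => if line.getD idx "" = "O" then ((idx : Int) + 1) else 0)).sum)
        (by
          intro t line
          rw [pv_foldl_shift _ (fun (idx : Nat) => if line.getD idx "" = "O" then ((idx : Int) + 1) else 0)]
          intro t idx; split <;> simp)]
      rw [zero_add, List.map_map, pv_list_sum_range]
      apply Finset.sum_congr rfl
      intro i hi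
      have hilt : i < m := Finset.mem_range.mp hi
      simp only [Function.comp]
      have hlen : ((lines.map (fun row => row.getD i "")).reverse).length = n := by simp [hn]
      rw [pv_list_sum_range]
      rw [hlen]
      apply Finset.sum_congr rfl
      intro idx hidx
      have hidxn : idx < n := Finset.mem_range.mp hidx
      have hget : ((lines.map (fun row => row.getD i "")).reverse).getD idx ""
          = (lines.getD (n - 1 - idx) []).getD i "" := by
        have h1 : idx < ((lines.map (fun row => row.getD i "")).reverse).length := by
          rw [hlen]; exact hidxn
        rw [List.getD_eq_getElem _ _ h1, List.getElem_reverse]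
        have h2 : (lines.map (fun row => row.getD i "")).length - 1 - idx < lines.length := by
          simp only [List.length_map]; omega
        rw [List.getElem_map]
        have h3 : (lines.map (fun row => row.getD i "")).length - 1 - idx = n - 1 - idx := by
          simp [hn]
        have h4 : n - 1 - idx < lines.length := by omega
        rw [List.getD_eq_getElem _ _ h4]
        congr 1
        simp [hn]
      rw [hget]
    -- B-side
    have hB : (PySem.List.enumerate lines).foldl (fun t p =>
        (List.range m).foldl
          (fun t2 c => if p.2.getD c "" = "O" then t2 + ((n : Int) - p.1) else t2) t) 0
        = ∑ r ∈ Finset.range n, ∑ c ∈ Finset.range m,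
            (if (lines.getD r []).getD c "" = "O" then ((n : Int) - (r : Int)) else 0) := by
      rw [pv_foldl_shift _
        (fun p => ((List.range m).map
          (fun (c : Nat) => if p.2.getD c "" = "O" then ((n : Int) - p.1) else 0)).sum)
        (by
          intro t p
          rw [pv_foldl_shift _ (fun (c : Nat) => if p.2.getD c "" = "O" then ((n : Int) - p.1) else 0)]
          intro t c; split <;> simp)]
      rw [zero_add, pv_sum_enumerate]
      apply Finset.sum_congr rfl
      intro r _
      rw [pv_list_sum_range]
      simp
    rw [hA, hB]
    -- swap the sums, then reflect the row index r = n - 1 - idx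
    rw [Finset.sum_comm, ← Finset.sum_range_reflect
      (fun r => ∑ c ∈ Finset.range m,
        (if (lines.getD r []).getD c "" = "O" then ((n : Int) - (r : Int)) else 0)) n]
    apply Finset.sum_congr rfl
    intro idx hidx
    have hidxn : idx < n := Finset.mem_range.mp hidx
    have hn1 : 1 ≤ n := by
      have : lines ≠ [] := hnil
      cases lines with
      | nil => exact absurd rfl this
      | cons a t => simp [hn]
    apply Finset.sum_congr rfl
    intro i _
    have hcast : ((n : Int) - ((n - 1 - idx : Nat) : Int)) = (idx : Int) + 1 := by
      have h1 : ((n - 1 - idx : Nat) : Int) = (n : Int) - 1 - (idx : Int) := by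
        push_cast [Nat.cast_sub (by omega : idx ≤ n - 1), Nat.cast_sub (by omega : 1 ≤ n)]
        ring
      rw [h1]; ring
    rw [hcast]

-- ===== VERDICT (by name: the statement is the Claim_ definition above) =====
theorem find_final_sum_spec : Claim_equal_find_final_sum := by
  intro lines _
  unfold Spec_find_final_sum
  exact find_final_sum_spec_aux lines
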